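-- pv_equiv track=rewrite | github.com/perez182/ejercicios-python | uri1781.py | operacion_1
-- ===== SOURCE A (Python) =====
-- def operacion_1(cadena,num_saltos):
--     num_saltos=int(num_saltos)
--     array_cadena_final=list(cadena)
--     vocales=dict.fromkeys(['a','e','i','o','u'])
--     posiciones=[]
--
--     for i in range(len(cadena)):
--         if (cadena[i] in vocales)==False:
--             posiciones.append(i)
--
--
--     for i in range(len(posiciones)):
--         new_posicion=(i+num_saltos)%len(posiciones)
--         array_cadena_final[posiciones[new_posicion]]=cadena[posiciones[i]]
--     return "".join(array_cadena_final)
-- ===== SOURCE B (Python) =====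
-- def operacion_1(cadena, num_saltos):
--     num_saltos = int(num_saltos)
--     vocales = {'a', 'e', 'i', 'o', 'u'}
--     cons = [ch for ch in cadena if ch not in vocales]
--     if not cons:
--         return cadena
--     s = num_saltos % len(cons)
--     rotated = cons[-s:] + cons[:-s]
--     it = iter(rotated)
--     return "".join(next(it) if ch not in vocales else ch for ch in cadena)
-- ===== Notes on version B (the rewrite author's own statement) =====
-- stated objective: simpler
-- what changed: A builds a list of consonant index positions and scatter-assigns each consonant into position (i+num_saltos) % len(posiciones) of a copied character array; B instead materialises the consonant subsequence, rotates it once by slicing (cons[-shift:] + cons[:-shift] with shift = num_saltos % len(cons)), and re-inserts the rotated characters in a single sequential pass over the string.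
import Mathlib
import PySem

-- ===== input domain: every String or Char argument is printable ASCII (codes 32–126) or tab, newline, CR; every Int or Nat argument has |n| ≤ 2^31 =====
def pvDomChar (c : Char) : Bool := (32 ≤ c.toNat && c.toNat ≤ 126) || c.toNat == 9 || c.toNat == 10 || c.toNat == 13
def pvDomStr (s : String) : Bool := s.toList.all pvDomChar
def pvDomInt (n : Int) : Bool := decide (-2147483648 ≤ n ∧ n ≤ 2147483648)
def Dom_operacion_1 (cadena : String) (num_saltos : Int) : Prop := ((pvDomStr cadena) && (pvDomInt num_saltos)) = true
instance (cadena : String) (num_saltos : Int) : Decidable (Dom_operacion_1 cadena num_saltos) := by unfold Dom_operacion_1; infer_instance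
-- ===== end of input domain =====

-- B replaces A's position-list + modular scatter-assignment with a filtered consonant list,
-- a slice rotation, and one sequential re-insertion pass (objective: simpler).

-- ===== PORT A =====
-- literal transliteration of Source A: positions of consonants, then scatter writes at (i+num_saltos) % len(posiciones)
def operacion_1 (cadena : String) (num_saltos : Int) : String :=
  let c := cadena.toList                                   -- list(cadena)
  let vocales := PySem.List.dedup ['a','e','i','o','u']    -- dict.fromkeys([...]): ordered key set
  let posiciones : List Int :=
    (PySem.List.pyRange 0 (c.length : Int) 1).foldl
      (fun ps i =>
        if (vocales.contains (PySem.List.pyGetD c i ' ')) == false then ps ++ [i] else ps) []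
  let arr :=
    (PySem.List.pyRange 0 (posiciones.length : Int) 1).foldl
      (fun a i =>
        let new_posicion := PySem.Int.mod (i + num_saltos) (posiciones.length : Int)
        PySem.List.pySetD a (PySem.List.pyGetD posiciones new_posicion 0)
          (PySem.List.pyGetD c (PySem.List.pyGetD posiciones i 0) ' ')) c
  String.ofList arr                                            -- "".join(...)

-- ===== PORT B =====
-- helper for Source B's single join pass: consonant slots take the next rotated char in order
-- (the rot = [] consonant case is unreachable: rotated holds one char per consonant)
def pvMerge (voc : List Char) : List Char → List Char → List Char
  | _, [] => []
  | rot, ch :: cs =>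
    if voc.contains ch then ch :: pvMerge voc rot cs
    else match rot with
         | r :: rs => r :: pvMerge voc rs cs
         | [] => ch :: pvMerge voc [] cs

def operacion_1_alt (cadena : String) (num_saltos : Int) : String :=
  let vocales : PySem.Set Char := PySem.Set.ofList ['a','e','i','o','u']
  let cons := cadena.toList.filter (fun ch => !(vocales.contains ch))
  if cons = [] then cadena
  else
    let s := PySem.Int.mod num_saltos (cons.length : Int)
    let rotated := PySem.List.slice cons (some (-s)) none ++ PySem.List.slice cons none (some (-s))
    String.ofList (pvMerge vocales rotated cadena.toList)

-- ===== PRECONDITION & SPEC =====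
def Spec_operacion_1 (cadena : String) (num_saltos : Int) (out : String) : Prop := out = operacion_1_alt cadena num_saltos
instance (cadena : String) (num_saltos : Int) (out : String) : Decidable (Spec_operacion_1 cadena num_saltos out) := by unfold Spec_operacion_1; infer_instance

-- ===== CLAIM (what is proved, stated in full; the proofs are below) =====
def Claim_equal_operacion_1 : Prop := ∀ (cadena : String) (num_saltos : Int), Dom_operacion_1 cadena num_saltos → Spec_operacion_1 cadena num_saltos (operacion_1 cadena num_saltos)

-- ===== LEMMAS AND PROOFS =====

-- consonant test shared by both programs
def pvCons (ch : Char) : Bool := !(['a','e','i','o','u'] : List Char).contains ch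

-- positions (as Nat indices) of consonants in a char list
def pvPos : List Char → List Nat
  | [] => []
  | ch :: cs => if pvCons ch then 0 :: (pvPos cs).map (· + 1) else (pvPos cs).map (· + 1)

theorem pvPos_length (c : List Char) : (pvPos c).length = (c.filter pvCons).length := by
  induction c with
  | nil => rfl
  | cons ch cs ih =>
    by_cases h : pvCons ch = true <;> simp [pvPos, h, ih]

theorem pvPos_nodup (c : List Char) : (pvPos c).Nodup := by
  induction c with
  | nil => simp [pvPos]
  | cons ch cs ih =>
    by_cases h : pvCons ch = true <;>
      simp [pvPos, h, List.nodup_cons] <;>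
      exact ih.map (fun a b h => by omega)

theorem pvGetD_map_add_one (l : List Nat) (k : Nat) (hk : k < l.length) :
    (l.map (· + 1)).getD k 0 = l.getD k 0 + 1 := by
  simp [List.getD_eq_getElem?_getD, hk]

theorem pvPos_getD (c : List Char) (k : Nat) (hk : k < (pvPos c).length) :
    c.getD ((pvPos c).getD k 0) ' ' = (c.filter pvCons).getD k ' ' := by
  induction c generalizing k with
  | nil => simp [pvPos] at hk
  | cons ch cs ih =>
    by_cases h : pvCons ch = true
    · cases k with
      | zero => simp [pvPos, h]
      | succ k =>
        have hk' : k < (pvPos cs).length := by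
          simpa [pvPos, h] using hk
        rw [show pvPos (ch :: cs) = 0 :: (pvPos cs).map (· + 1) from by simp [pvPos, h],
          List.getD_cons_succ, pvGetD_map_add_one _ _ hk', List.getD_cons_succ,
          List.filter_cons_of_pos h, List.getD_cons_succ]
        exact ih k hk'
    · have hk' : k < (pvPos cs).length := by
        simpa [pvPos, h] using hk
      rw [show pvPos (ch :: cs) = (pvPos cs).map (· + 1) from by simp [pvPos, h],
        pvGetD_map_add_one _ _ hk', List.getD_cons_succ,
        List.filter_cons_of_neg (by simpa using h)]
      exact ih k hk'

theorem pvPos_eq_filter_range (c : List Char) :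
    (List.range c.length).filter (fun k => pvCons (c.getD k ' ')) = pvPos c := by
  induction c with
  | nil => rfl
  | cons ch cs ih =>
    simp only [List.length_cons, List.range_succ_eq_map, List.filter_cons, List.filter_map]
    by_cases h : pvCons ch = true <;>
      simp [pvPos, h, Function.comp_def, ← ih, Nat.succ_eq_add_one]

-- fold of writes at shifted positions = fold of (position, value) pairs
theorem pvShiftFold (ps : List (Nat × Char)) (x : Char) (a : List Char) :
    (ps.map (fun p => (p.1 + 1, p.2))).foldl (fun a p => a.set p.1 p.2) (x :: a)
      = x :: ps.foldl (fun a p => a.set p.1 p.2) a := by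
  induction ps generalizing a with
  | nil => rfl
  | cons p ps ih => simp [List.set_cons_succ, ih]

-- B's merge pass = applying the (position, value) writes in order
theorem pvMerge_eq_setAll (c rot : List Char) (h : rot.length = (c.filter pvCons).length) :
    pvMerge ['a','e','i','o','u'] rot c
      = ((pvPos c).zip rot).foldl (fun a p => a.set p.1 p.2) c := by
  induction c generalizing rot with
  | nil =>
    cases rot with
    | nil => rfl
    | cons r rs => simp [List.filter] at h
  | cons ch cs ih =>
    have hmap : ∀ rs : List Char, (List.map (fun x => x + 1) (pvPos cs)).zip rs
        = ((pvPos cs).zip rs).map (fun p => (p.1 + 1, p.2)) := by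
      intro rs
      rw [List.zip_map_left]
      exact List.map_congr_left (by rintro ⟨a, b⟩ _; rfl)
    by_cases hv : (['a','e','i','o','u'] : List Char).contains ch = true
    · -- vowel head
      have hch : pvCons ch = false := by unfold pvCons; rw [hv]; rfl
      have h' : rot.length = (cs.filter pvCons).length := by
        simpa [List.filter_cons, hch] using h
      simp only [pvMerge, hv, if_true, pvPos, hch, Bool.false_eq_true, if_false,
        hmap, pvShiftFold]
      rw [ih rot h']
    · -- consonant head: rot is nonempty
      have hv' : (['a','e','i','o','u'] : List Char).contains ch = false := by
        cases hc : (['a','e','i','o','u'] : List Char).contains ch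
        · rfl
        · exact absurd hc hv
      have hch : pvCons ch = true := by unfold pvCons; rw [hv']; rfl
      cases rot with
      | nil => simp [hch] at h
      | cons r rs =>
        have h' : rs.length = (cs.filter pvCons).length := by
          simpa [List.filter_cons, hch] using h
        simp only [pvMerge, hv', Bool.false_eq_true, if_false, pvPos, hch, if_true,
          List.zip_cons_cons, List.foldl_cons, List.set_cons_zero, hmap, pvShiftFold]
        rw [ih rs h']

-- the rotation map k ↦ (k+s) % L permutes range L
theorem pvRotPerm (L s : Nat) (hL : 0 < L) :
    ((List.range L).map (fun k => (k + s) % L)).Perm (List.range L) := by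
  have ht : s % L < L := Nat.mod_lt _ hL
  have hclosed : ∀ k, k < L → (k + s) % L = if k + s % L < L then k + s % L else k + s % L - L := by
    intro k hk
    have h1 : (k + s) % L = (k + s % L) % L := by
      conv_lhs => rw [Nat.add_mod]
      conv_rhs => rw [Nat.add_mod]
      rw [Nat.mod_mod]
    rw [h1]
    split
    · exact Nat.mod_eq_of_lt (by omega)
    · rw [Nat.mod_eq_sub_mod (by omega)]
      exact Nat.mod_eq_of_lt (by omega)
  apply List.perm_of_nodup_nodup_toFinset_eq
  · apply List.Nodup.map_on _ (List.nodup_range)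
    intro x hx y hy hxy
    rw [List.mem_range] at hx hy
    rw [hclosed x hx, hclosed y hy] at hxy
    split at hxy <;> split at hxy <;> omega
  · exact List.nodup_range
  · apply Finset.eq_of_subset_of_card_le
    · intro x hx
      simp only [List.mem_toFinset, List.mem_map, List.mem_range] at hx ⊢
      rcases hx with ⟨k, hk, rfl⟩
      exact Nat.mod_lt _ hL
    · rw [List.toFinset_card_of_nodup List.nodup_range,
        List.toFinset_card_of_nodup
          (List.Nodup.map_on (by
            intro x hx y hy hxy
            rw [List.mem_range] at hx hy
            rw [hclosed x hx, hclosed y hy] at hxy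
            split at hxy <;> split at hxy <;> omega) List.nodup_range)]
      simp

theorem pvGetD_map_int (l : List Nat) (m : Nat) (hm : m < l.length) :
    (l.map (fun k : Nat => (k : Int))).getD m 0 = ((l.getD m 0 : Nat) : Int) := by
  simp [List.getD_eq_getElem?_getD, hm]

theorem pvGetD_eq {α : Type} (l : List α) (j : Nat) (d : α) (h : j < l.length) : l.getD j d = l[j] := by
  simp [List.getD_eq_getElem?_getD, h]

theorem pvCore (c : List Char) (ns : Int) (hL0 : 0 < (c.filter pvCons).length) :
    (PySem.List.pyRange 0 ((((pvPos c).map (fun k : Nat => (k : Int))).length : Int)) 1).foldl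
      (fun a i =>
        PySem.List.pySetD a
          (PySem.List.pyGetD ((pvPos c).map (fun k : Nat => (k : Int)))
            (PySem.Int.mod (i + ns) ((((pvPos c).map (fun k : Nat => (k : Int))).length : Int))) 0)
          (PySem.List.pyGetD c (PySem.List.pyGetD ((pvPos c).map (fun k : Nat => (k : Int))) i 0) ' ')) c
      = pvMerge ['a','e','i','o','u']
          (PySem.List.slice (c.filter pvCons) (some (-(PySem.Int.mod ns (((c.filter pvCons).length : Nat) : Int)))) none
            ++ PySem.List.slice (c.filter pvCons) none (some (-(PySem.Int.mod ns (((c.filter pvCons).length : Nat) : Int))))) c := by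
  have hlen : (pvPos c).length = (c.filter pvCons).length := pvPos_length c
  have hLI : 0 < (((c.filter pvCons).length : Nat) : Int) := by exact_mod_cast hL0
  have hs0 : 0 ≤ PySem.Int.mod ns (((c.filter pvCons).length : Nat) : Int) := PySem.Int.mod_nonneg ns hLI
  have hsL : PySem.Int.mod ns (((c.filter pvCons).length : Nat) : Int) < (((c.filter pvCons).length : Nat) : Int) := PySem.Int.mod_lt ns hLI
  set cons := c.filter pvCons with hconsdef
  set posN := pvPos c with hposNdef
  set L := cons.length with hLdef
  set s := PySem.Int.mod ns (L : Int) with hsdef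
  set sN := s.toNat with hsNdef
  have hsInt : (sN : Int) = s := Int.toNat_of_nonneg hs0
  have hsNL : sN < L := by omega
  -- rotated list facts
  have hrotlen : (PySem.List.slice cons (some (-s)) none ++ PySem.List.slice cons none (some (-s))).length = L := by
    rcases Nat.eq_zero_or_pos sN with h0 | hp
    · have hs' : s = 0 := by omega
      rw [hs']
      simp [PySem.List.slice_zero_start, PySem.List.slice_none_none, PySem.List.slice_to]
      exact hLdef.symm
    · rw [← hsInt, PySem.List.slice_from_neg_natCast cons sN hp, PySem.List.slice_to_neg_natCast cons sN hp]
      simp only [List.length_append, List.length_drop, List.length_take]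
      omega
  have hrotget : ∀ j, j < L → (PySem.List.slice cons (some (-s)) none ++ PySem.List.slice cons none (some (-s))).getD j ' '
      = cons.getD ((j + (L - sN)) % L) ' ' := by
    intro j hj
    rcases Nat.eq_zero_or_pos sN with h0 | hp
    · have hs' : s = 0 := by omega
      rw [hs']
      rw [show PySem.List.slice cons (some (-0 : Int)) none = cons from by
        simp [PySem.List.slice_zero_start, PySem.List.slice_none_none]]
      rw [show PySem.List.slice cons none (some (-0 : Int)) = [] from by
        simp [PySem.List.slice_to]]
      rw [List.append_nil]
      congr 1
      rw [h0, Nat.sub_zero, Nat.add_mod_right]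
      exact (Nat.mod_eq_of_lt hj).symm
    · rw [← hsInt, PySem.List.slice_from_neg_natCast cons sN hp, PySem.List.slice_to_neg_natCast cons sN hp]
      have hdl : (cons.drop (cons.length - sN)).length = sN := by
        simp only [List.length_drop]
        omega
      by_cases hjs : j < sN
      · rw [List.getD_eq_getElem?_getD, List.getElem?_append_left (by rw [hdl]; exact hjs),
          List.getElem?_drop]
        rw [show (j + (L - sN)) % L = cons.length - sN + j from by
          rw [Nat.mod_eq_of_lt (by omega)]; omega]
        rw [← List.getD_eq_getElem?_getD]
      · rw [List.getD_eq_getElem?_getD, List.getElem?_append_right (by rw [hdl]; omega), hdl,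
          List.getElem?_take_of_lt (by omega : j - sN < cons.length - sN)]
        rw [show (j + (L - sN)) % L = j - sN from by
          rw [Nat.mod_eq_sub_mod (by omega)]
          rw [show j + (L - sN) - L = j - sN from by omega]
          exact Nat.mod_eq_of_lt (by omega)]
        rw [← List.getD_eq_getElem?_getD]
  -- normalise A's loop to a Nat-indexed fold of plain set writes
  have h1 : PySem.List.pyRange 0 (((posN.map (fun k : Nat => (k : Int))).length : Int)) 1
      = (List.range L).map (fun k : Nat => (k : Int)) := by
    rw [show (((posN.map (fun k : Nat => (k : Int))).length : Int)) = ((L : Nat) : Int) from by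
      simp [hlen]]
    exact PySem.List.pyRange_zero_natCast L
  rw [h1]
  rw [List.foldl_map]
  have hmod : ∀ k : Nat, PySem.Int.mod ((k : Int) + ns) (((posN.map (fun k : Nat => (k : Int))).length : Int))
      = (((k + sN) % L : Nat) : Int) := by
    intro k
    rw [show (((posN.map (fun k : Nat => (k : Int))).length : Int)) = ((L : Nat) : Int) from by
      simp [hlen]]
    rw [PySem.Int.mod_eq_emod_of_pos hLI, Int.natCast_emod]
    push_cast
    conv_lhs => rw [Int.add_emod]
    conv_rhs => rw [Int.add_emod]
    rw [hsInt, hsdef, PySem.Int.mod_eq_emod_of_pos hLI, Int.emod_emod]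
  have hstep : ∀ (a : List Char), ∀ k ∈ List.range L,
      PySem.List.pySetD a
          (PySem.List.pyGetD (posN.map (fun k : Nat => (k : Int)))
            (PySem.Int.mod ((k : Int) + ns) ((((posN.map (fun k : Nat => (k : Int))).length : Int))) ) 0)
          (PySem.List.pyGetD c (PySem.List.pyGetD (posN.map (fun k : Nat => (k : Int))) (k : Int) 0) ' ')
      = a.set (posN.getD ((k + sN) % L) 0) (cons.getD k ' ') := by
    intro a k hk
    rw [List.mem_range] at hk
    rw [hmod k]
    rw [show PySem.List.pyGetD (posN.map (fun k : Nat => (k : Int))) (((((k + sN) % L : Nat)) : Int)) 0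
        = ((posN.getD ((k + sN) % L) 0 : Nat) : Int) from by
      rw [PySem.List.pyGetD_natCast]
      exact pvGetD_map_int posN _ (by rw [hlen]; exact Nat.mod_lt _ hL0)]
    rw [show PySem.List.pyGetD (posN.map (fun k : Nat => (k : Int))) ((k : Nat) : Int) 0
        = ((posN.getD k 0 : Nat) : Int) from by
      rw [PySem.List.pyGetD_natCast]
      exact pvGetD_map_int posN _ (by rw [hlen]; exact hk)]
    rw [PySem.List.pySetD_natCast, PySem.List.pyGetD_natCast]
    rw [show c.getD (posN.getD k 0) ' ' = cons.getD k ' ' from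
      pvPos_getD c k (by rw [hlen]; exact hk)]
  rw [PySem.List.foldl_congr_mem (List.range L) _
    (fun a k => a.set (posN.getD ((k + sN) % L) 0) (cons.getD k ' ')) c hstep]
  rw [show (List.range L).foldl (fun a k => a.set (posN.getD ((k + sN) % L) 0) (cons.getD k ' ')) c
      = ((List.range L).map (fun k => (posN.getD ((k + sN) % L) 0, cons.getD k ' '))).foldl
          (fun (a : List Char) p => a.set p.1 p.2) c from by rw [List.foldl_map]]
  have hindex : ∀ k, k < L → ((k + sN) % L + (L - sN)) % L = k := by
    intro k hk
    rw [Nat.mod_add_mod]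
    rw [show k + sN + (L - sN) = k + L from by omega]
    rw [Nat.add_mod_right]
    exact Nat.mod_eq_of_lt hk
  have hlist1 : (List.range L).map (fun k => (posN.getD ((k + sN) % L) 0, cons.getD k ' '))
      = ((List.range L).map (fun k => (k + sN) % L)).map
          (fun j => (posN.getD j 0, cons.getD ((j + (L - sN)) % L) ' ')) := by
    rw [List.map_map]
    apply List.map_congr_left
    intro k hk
    rw [List.mem_range] at hk
    simp only [Function.comp_apply]
    rw [hindex k hk]
  rw [hlist1]
  have hperm := (pvRotPerm L sN hL0).map
    (fun j => (posN.getD j 0, cons.getD ((j + (L - sN)) % L) ' '))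
  have hcomm : ∀ x ∈ ((List.range L).map (fun k => (k + sN) % L)).map
          (fun j => (posN.getD j 0, cons.getD ((j + (L - sN)) % L) ' ')),
      ∀ y ∈ ((List.range L).map (fun k => (k + sN) % L)).map
          (fun j => (posN.getD j 0, cons.getD ((j + (L - sN)) % L) ' ')),
      ∀ z : List Char, (z.set x.1 x.2).set y.1 y.2 = (z.set y.1 y.2).set x.1 x.2 := by
    intro x hx y hy z
    simp only [List.mem_map, List.mem_range] at hx hy
    rcases hx with ⟨j1, ⟨k1, hk1, rfl⟩, rfl⟩
    rcases hy with ⟨j2, ⟨k2, hk2, rfl⟩, rfl⟩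
    by_cases hj : (k1 + sN) % L = (k2 + sN) % L
    · rw [hj]
    · apply List.set_comm
      intro he
      have hj1 : (k1 + sN) % L < posN.length := by rw [hlen]; exact Nat.mod_lt _ hL0
      have hj2 : (k2 + sN) % L < posN.length := by rw [hlen]; exact Nat.mod_lt _ hL0
      rw [pvGetD_eq posN _ 0 hj1, pvGetD_eq posN _ 0 hj2] at he
      exact hj ((List.Nodup.getElem_inj_iff (pvPos_nodup c)).mp he)
  rw [List.Perm.foldl_eq' hperm hcomm c]
  have hzip : (List.range L).map (fun j => (posN.getD j 0, cons.getD ((j + (L - sN)) % L) ' '))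
      = posN.zip (PySem.List.slice cons (some (-s)) none ++ PySem.List.slice cons none (some (-s))) := by
    apply List.ext_getElem
    · simp [hlen, hrotlen]
    · intro i h1 h2
      have hi : i < L := by simpa using h1
      simp only [List.getElem_map, List.getElem_range, List.getElem_zip]
      refine Prod.ext ?_ ?_
      · exact pvGetD_eq posN i 0 (by rw [hlen]; exact hi)
      · have h3 := hrotget i hi
        rw [pvGetD_eq _ i ' ' (by rw [hrotlen]; exact hi)] at h3
        exact h3.symm
  rw [hzip]
  rw [← pvMerge_eq_setAll c _ (by rw [hrotlen, hLdef])]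

theorem pvMain (c : List Char) (ns : Int) :
    operacion_1 (String.ofList c) ns = operacion_1_alt (String.ofList c) ns := by
  have hpos : ((PySem.List.pyRange 0 (c.length : Int) 1).foldl
      (fun ps i =>
        if ((PySem.List.dedup ['a','e','i','o','u']).contains (PySem.List.pyGetD c i ' ')) == false
        then ps ++ [i] else ps) ([] : List Int))
      = (pvPos c).map (fun k : Nat => (k : Int)) := by
    rw [show PySem.List.dedup ['a','e','i','o','u'] = ['a','e','i','o','u'] from rfl]
    rw [show ((c.length : Int)) = ((c.length : Nat) : Int) from rfl,
      PySem.List.pyRange_zero_natCast, List.foldl_map]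
    simp only [PySem.List.pyGetD_natCast]
    rw [PySem.List.foldl_append_if
      (fun k : Nat => ((['a','e','i','o','u'] : List Char).contains (c.getD k ' ') == false))
      (fun k : Nat => (k : Int)) (List.range c.length) []]
    rw [List.nil_append]
    congr 1
    rw [← pvPos_eq_filter_range]
    apply List.filter_congr
    intro k _
    simp [pvCons]
  have hBpred : c.filter (fun ch => !((PySem.Set.ofList ['a','e','i','o','u'] : PySem.Set Char).contains ch))
      = c.filter pvCons := by
    apply List.filter_congr
    intro ch _
    rfl
  simp only [operacion_1, operacion_1_alt, String.toList_ofList]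
  rw [hpos, hBpred]
  rw [show (PySem.Set.ofList ['a','e','i','o','u'] : PySem.Set Char) = (['a','e','i','o','u'] : List Char) from rfl]
  by_cases h0 : c.filter pvCons = []
  · rw [if_pos h0]
    have hnil : pvPos c = [] := by
      have := pvPos_length c
      rw [h0] at this
      exact List.eq_nil_of_length_eq_zero this
    rw [hnil]
    rw [show PySem.List.pyRange 0 ((((List.map (fun k : Nat => (k : Int)) ([] : List Nat)).length : Nat)) : Int) 1 = [] from by
      rw [PySem.List.pyRange_zero_natCast]; rfl]
    rfl
  · rw [if_neg h0]
    congr 1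
    exact pvCore c ns (by
      rcases Nat.eq_zero_or_pos (c.filter pvCons).length with h | h
      · exact absurd (List.eq_nil_of_length_eq_zero h) h0
      · exact h)

-- ===== VERDICT (by name: the statement is the Claim_ definition above) =====
theorem operacion_1_spec : Claim_equal_operacion_1 := by
  intro cadena ns _
  unfold Spec_operacion_1
  have := pvMain cadena.toList ns
  simpa using this
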